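-- pv_equiv track=rewrite | github.com/godinenbicicleta/AoC | 2021/day23/day23.py | get_real_distance
-- ===== SOURCE A (Python) =====
-- def get_real_distance(p1, p2):
--     x1, y1 = p1
--     x2, y2 = p2
--     d = 0
--     while y1 > 0:
--         y1 -= 1
--         d += 1
--     return 2 * d + abs(x1 - x2)
-- ===== SOURCE B (Python) =====
-- def get_real_distance(p1, p2):
--     x1, y1 = p1
--     x2, y2 = p2
--     return 2 * max(y1, 0) + abs(x1 - x2)
-- ===== Notes on version B (the rewrite author's own statement) =====
-- stated objective: simpler
-- what changed: Replaced the unit-decrement counting loop over y1 by the closed-form 2*max(y1,0) + abs(x1-x2).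
import Mathlib
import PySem

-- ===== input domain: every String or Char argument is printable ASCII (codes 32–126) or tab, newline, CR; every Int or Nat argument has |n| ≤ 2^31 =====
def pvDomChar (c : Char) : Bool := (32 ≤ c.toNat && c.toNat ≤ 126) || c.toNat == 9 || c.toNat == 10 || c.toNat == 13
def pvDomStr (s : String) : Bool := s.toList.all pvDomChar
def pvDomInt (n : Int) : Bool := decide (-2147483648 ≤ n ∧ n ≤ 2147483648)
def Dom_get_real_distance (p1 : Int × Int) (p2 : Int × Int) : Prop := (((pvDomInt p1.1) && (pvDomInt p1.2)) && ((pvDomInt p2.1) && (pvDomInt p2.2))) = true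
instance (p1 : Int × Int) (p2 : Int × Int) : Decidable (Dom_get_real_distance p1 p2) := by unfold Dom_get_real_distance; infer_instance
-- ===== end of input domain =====

-- B replaces A's unit-decrement counting loop by the closed form 2*max(y1,0) + |x1-x2| (simpler, O(1)).

-- ===== PORT A =====
-- the `while y1 > 0: y1 -= 1; d += 1` loop, step for step
def pvLoop_get_real_distance (y1 d : Int) : Int :=
  if h : y1 > 0 then pvLoop_get_real_distance (y1 - 1) (d + 1) else d
termination_by y1.toNat
decreasing_by omega

def get_real_distance (p1 : Int × Int) (p2 : Int × Int) : Int :=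
  let x1 := p1.1; let y1 := p1.2
  let x2 := p2.1; let _y2 := p2.2
  let d := pvLoop_get_real_distance y1 0
  2 * d + |x1 - x2|

-- ===== PORT B =====
def get_real_distance_alt (p1 : Int × Int) (p2 : Int × Int) : Int :=
  2 * max p1.2 0 + |p1.1 - p2.1|

-- ===== PRECONDITION & SPEC =====
def Spec_get_real_distance (p1 : Int × Int) (p2 : Int × Int) (out : Int) : Prop := out = get_real_distance_alt p1 p2
instance (p1 : Int × Int) (p2 : Int × Int) (out : Int) : Decidable (Spec_get_real_distance p1 p2 out) := by unfold Spec_get_real_distance; infer_instance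

-- ===== CLAIM (what is proved, stated in full; the proofs are below) =====
def Claim_equal_get_real_distance : Prop := ∀ (p1 : Int × Int) (p2 : Int × Int), Dom_get_real_distance p1 p2 → Spec_get_real_distance p1 p2 (get_real_distance p1 p2)

-- ===== LEMMAS AND PROOFS =====
theorem pvLoop_eq (y1 d : Int) : pvLoop_get_real_distance y1 d = d + max y1 0 := by
  by_cases h : y1 > 0
  · have : pvLoop_get_real_distance y1 d = pvLoop_get_real_distance (y1 - 1) (d + 1) := by
      rw [pvLoop_get_real_distance]; simp [h]
    rw [this, pvLoop_eq (y1 - 1) (d + 1)]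
    omega
  · rw [pvLoop_get_real_distance]; simp [h]; omega
termination_by y1.toNat
decreasing_by omega

-- ===== VERDICT (by name: the statement is the Claim_ definition above) =====
theorem get_real_distance_spec : Claim_equal_get_real_distance := by
  intro p1 p2 _
  unfold Spec_get_real_distance get_real_distance get_real_distance_alt
  simp [pvLoop_eq]
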